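-- pv_equiv track=rewrite | github.com/DanilKrivonos/BioCAT | BioCAT/src/Combinatorics.py | create_variants
-- ===== SOURCE A (Python) =====
-- from itertools import permutations, product
--
-- def create_variants(original_seq, len_place):
--     """
--     Combined fragments to possible sequences.
--
--     Parameters
--     ----------
--     original_seq : list
--         Sequence of possible fragments.
--     len_place : int
--         Length of PSSM profile (length of cluster).
--     Returns
--     -------
--     concatenates : list
--         Possible combined sequence from continual fragments.
--     """
--     seq = []
--
--     for s in original_seq:
--         if len(s) != 0:
--             seq.append(s)
--
--     N = sum([len(s) for s in seq])
--     N_cnt = len(seq) + 1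
--     orders = list(
--         permutations([i for i in range(len(seq))])
--     )
--     free_slots = len_place - N
--
--     variants = []
--     for rep in product(
--         [i for i in range(free_slots + 1)],
--         repeat = N_cnt
--     ):
--         if sum(rep) == free_slots:
--             variants.append(rep)
--     concatenates = []
--
--     for v in variants:
--         for o in orders:
--             concat = []
--             for j in range(len(v)-1):
--                 concat += ['nan'] * v[j]
--                 concat += seq[o[j]]
--             concat += ['nan'] * v[-1]
--             concatenates.append(concat)
--
--
--
--     concatenates = list(set (map(tuple, concatenates)))
--     concatenates.sort()
--
--     return concatenates
-- ===== SOURCE B (Python) =====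
-- from itertools import permutations
--
-- def create_variants(original_seq, len_place):
--     seq = [s for s in original_seq if len(s) != 0]
--     free = len_place - sum(len(s) for s in seq)
--
--     def comps(parts, total):
--         # compositions of `total` into `parts` non-negative parts, lexicographic
--         if parts == 0:
--             return [()] if total == 0 else []
--         return [(i,) + rest for i in range(total + 1) for rest in comps(parts - 1, total - i)]
--
--     out = set()
--     for v in comps(len(seq) + 1, free):
--         for o in permutations(range(len(seq))):
--             perm = [seq[i] for i in o] + [[]]
--             out.add(tuple(x for pad, frag in zip(v, perm) for x in ['nan'] * pad + frag))
--     return sorted(out)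
-- ===== Notes on version B (the rewrite author's own statement) =====
-- stated objective: alternative
-- what changed: B enumerates the padding tuples directly as the compositions of free_slots into len(seq)+1 non-negative parts by a stars-and-bars recursion, instead of generating the full (free_slots+1)^(len(seq)+1) Cartesian product and filtering it by sum; it also builds the result set incrementally while looping instead of materialising the full list of concatenations first. Intended as asymptotically faster in the enumeration phase; a timing run could not confirm a ratio (A timed out where B returned).
import Mathlib
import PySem

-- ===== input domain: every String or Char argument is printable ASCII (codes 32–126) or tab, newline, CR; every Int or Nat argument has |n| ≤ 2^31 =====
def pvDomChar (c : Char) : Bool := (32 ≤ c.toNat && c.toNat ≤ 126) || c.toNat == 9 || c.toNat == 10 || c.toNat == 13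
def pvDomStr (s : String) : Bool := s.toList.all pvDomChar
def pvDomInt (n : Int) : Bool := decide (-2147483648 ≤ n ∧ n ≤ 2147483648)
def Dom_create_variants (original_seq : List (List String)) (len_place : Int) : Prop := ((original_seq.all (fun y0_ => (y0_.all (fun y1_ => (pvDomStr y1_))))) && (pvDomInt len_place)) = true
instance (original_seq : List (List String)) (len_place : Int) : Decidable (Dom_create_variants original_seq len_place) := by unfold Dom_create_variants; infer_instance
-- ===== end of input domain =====

-- B replaces A's product-then-filter enumeration of slot paddings by a direct recursive
-- enumeration of the compositions of free_slots (stars-and-bars), building the result set as it goes.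


-- ===== PORT A =====
-- itertools.product(pool, repeat = n), in itertools' order
def prodRep {α : Type} (pool : List α) : Nat → List (List α)
  | 0 => [[]]
  | n+1 => pool.flatMap (fun i => (prodRep pool n).map (i :: ·))

def create_variants (original_seq : List (List String)) (len_place : Int) : List (List String) :=
  let seq := original_seq.foldl (fun acc s => if PySem.List.len s ≠ 0 then acc ++ [s] else acc) []
  let N := (seq.map (fun s => PySem.List.len s)).sum
  let N_cnt := seq.length + 1
  let orders := PySem.List.permutations (PySem.List.pyRange 0 (PySem.List.len seq) 1) seq.length
  let free_slots := len_place - N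
  let variants := (prodRep (PySem.List.pyRange 0 (free_slots + 1) 1) N_cnt).filter
    (fun rep => rep.sum = free_slots)
  let concatenates := variants.foldl (fun acc v =>
    orders.foldl (fun acc o =>
      let concat := (PySem.List.pyRange 0 (PySem.List.len v - 1) 1).foldl (fun c j =>
        c ++ PySem.List.pyRepeat ["nan"] (PySem.List.pyGetD v j 0)
          ++ PySem.List.pyGetD seq (PySem.List.pyGetD o j 0) []) []
      acc ++ [concat ++ PySem.List.pyRepeat ["nan"] (PySem.List.pyGetD v (-1) 0)]) acc) []
  PySem.List.sorted (PySem.Set.ofList concatenates) (fun x => x) false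

-- ===== PORT B =====
-- compositions of `total` into `parts` non-negative parts, lexicographic
def compsB (total : Int) : Nat → List (List Int)
  | 0 => if total = 0 then [[]] else []
  | parts+1 => (PySem.List.pyRange 0 (total + 1) 1).flatMap
      (fun i => (compsB (total - i) parts).map (i :: ·))

def create_variants_alt (original_seq : List (List String)) (len_place : Int) : List (List String) :=
  let seq := original_seq.filter (fun s => PySem.List.len s ≠ 0)
  let free := len_place - (seq.map (fun s => PySem.List.len s)).sum
  let out := (compsB free (seq.length + 1)).foldl (fun out v =>
    (PySem.List.permutations (PySem.List.pyRange 0 (PySem.List.len seq) 1) seq.length).foldl (fun out o =>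
      let perm := o.map (fun i => PySem.List.pyGetD seq i []) ++ [[]]
      PySem.Set.add out ((v.zip perm).flatMap (fun p => PySem.List.pyRepeat ["nan"] p.1 ++ p.2))) out)
    PySem.Set.empty
  PySem.List.sorted out (fun x => x) false

-- ===== PRECONDITION & SPEC =====
def Spec_create_variants (original_seq : List (List String)) (len_place : Int) (out : List (List String)) : Prop := out = create_variants_alt original_seq len_place
instance (original_seq : List (List String)) (len_place : Int) (out : List (List String)) : Decidable (Spec_create_variants original_seq len_place out) := by unfold Spec_create_variants; infer_instance

-- ===== CLAIM (what is proved, stated in full; the proofs are below) =====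
def Claim_equal_create_variants : Prop := ∀ (original_seq : List (List String)) (len_place : Int), Dom_create_variants original_seq len_place → Spec_create_variants original_seq len_place (create_variants original_seq len_place)

-- ===== LEMMAS AND PROOFS =====

lemma compsB_of_neg (f : Int) (hf : f < 0) : ∀ n, compsB f n = [] := by
  intro n
  cases n with
  | zero => simp [compsB, show f ≠ 0 by omega]
  | succ m => simp [compsB, PySem.List.pyRange_one_eq_nil (show f + 1 ≤ 0 by omega)]

lemma length_of_mem_compsB : ∀ (n : Nat) (f : Int) (r : List Int), r ∈ compsB f n → r.length = n := by
  intro n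
  induction n with
  | zero => intro f r hr; simp [compsB] at hr; simp_all
  | succ m ih =>
    intro f r hr
    simp only [compsB, List.mem_flatMap, List.mem_map] at hr
    obtain ⟨i, -, s, hs, rfl⟩ := hr
    simp [ih _ _ hs]

lemma sum_nonneg_of_mem_prodRep (k : Int) :
    ∀ (n : Nat) (r : List Int), r ∈ prodRep (PySem.List.pyRange 0 k 1) n → 0 ≤ r.sum := by
  intro n
  induction n with
  | zero => intro r hr; simp [prodRep] at hr; simp [hr]
  | succ m ih =>
    intro r hr
    simp only [prodRep, List.mem_flatMap, List.mem_map] at hr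
    obtain ⟨i, hi, s, hs, rfl⟩ := hr
    rw [PySem.List.mem_pyRange_one] at hi
    have := ih _ hs
    simp; omega

lemma map_pyRange_zip {α β γ : Type} (f : α → β → List γ) (xs : List α) (ys : List β)
    (dx : α) (dy : β) (n : Nat) (hx : n ≤ xs.length) (hy : n ≤ ys.length) :
    (PySem.List.pyRange 0 (n : Int) 1).map
        (fun j => f (PySem.List.pyGetD xs j dx) (PySem.List.pyGetD ys j dy))
      = ((xs.take n).zip (ys.take n)).map (fun p => f p.1 p.2) := by
  apply List.ext_getElem
  · simp [PySem.List.length_pyRange_one]; omega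
  · intro k h1 h2
    have hk : k < n := by simp [PySem.List.length_pyRange_one] at h1; omega
    simp only [List.getElem_map, PySem.List.getElem_pyRange_one, zero_add, List.getElem_zip, List.getElem_take]
    rw [PySem.List.pyGetD_eq_getElem _ _ (by omega) (by simp; exact_mod_cast lt_of_lt_of_le hk hx),
        PySem.List.pyGetD_eq_getElem _ _ (by omega) (by simp; exact_mod_cast lt_of_lt_of_le hk hy)]
    simp


lemma prodRep_filter_eq_compsB :
    ∀ (n : Nat) (f k : Int), 0 ≤ f → f < k →
      (prodRep (PySem.List.pyRange 0 k 1) n).filter (fun r => r.sum = f) = compsB f n := by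
  intro n
  induction n with
  | zero =>
    intro f k h0 hk
    by_cases hf : f = 0 <;> simp [prodRep, compsB, hf, List.filter, eq_comm]
  | succ m ih =>
    intro f k h0 hk
    simp only [prodRep, List.filter_flatMap]
    have hstep : ∀ i ∈ PySem.List.pyRange 0 k 1,
        ((prodRep (PySem.List.pyRange 0 k 1) m).map (i :: ·)).filter (fun r => r.sum = f)
          = (compsB (f - i) m).map (i :: ·) := by
      intro i hi
      rw [PySem.List.mem_pyRange_one] at hi
      rw [List.filter_map]
      have hpred : ((fun r => decide (r.sum = f)) ∘ (i :: ·))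
          = (fun (r : List Int) => decide (r.sum = f - i)) := by
        funext r; simp [Function.comp]; constructor <;> intro h <;> omega
      rw [hpred]
      by_cases hfi : 0 ≤ f - i
      · rw [ih _ _ hfi (by omega)]
      · rw [compsB_of_neg _ (by omega), List.filter_eq_nil_iff.mpr, List.map_nil]
        intro r hr
        have := sum_nonneg_of_mem_prodRep k m r hr
        simp; omega
    rw [List.flatMap_congr hstep,
        PySem.List.pyRange_one_append 0 (f+1) k (by omega) (by omega),
        List.flatMap_append]
    have h2 : (PySem.List.pyRange (f+1) k 1).flatMap (fun i => (compsB (f - i) m).map (i :: ·)) = [] := by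
      rw [List.flatMap_eq_nil_iff]
      intro i hi
      rw [PySem.List.mem_pyRange_one] at hi
      rw [compsB_of_neg _ (by omega), List.map_nil]
    rw [h2, List.append_nil, compsB]

lemma variants_eq_compsB (f : Int) (n : Nat) :
    (prodRep (PySem.List.pyRange 0 (f + 1) 1) (n + 1)).filter (fun r => r.sum = f)
      = compsB f (n + 1) := by
  by_cases h0 : 0 ≤ f
  · exact prodRep_filter_eq_compsB (n+1) f (f+1) h0 (by omega)
  · rw [compsB_of_neg _ (by omega)]
    simp [prodRep, PySem.List.pyRange_one_eq_nil (show f + 1 ≤ 0 by omega)]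

lemma concat_eq (seq : List (List String)) (v : List Int) (o : List Int)
    (hv : v.length = seq.length + 1) (ho : o.length = seq.length) :
    (PySem.List.pyRange 0 (PySem.List.len v - 1) 1).foldl (fun c j =>
        c ++ PySem.List.pyRepeat ["nan"] (PySem.List.pyGetD v j 0)
          ++ PySem.List.pyGetD seq (PySem.List.pyGetD o j 0) []) []
      ++ PySem.List.pyRepeat ["nan"] (PySem.List.pyGetD v (-1) 0)
    = (v.zip (o.map (fun i => PySem.List.pyGetD seq i []) ++ [[]])).flatMap
        (fun p => PySem.List.pyRepeat ["nan"] p.1 ++ p.2) := by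
  have hne : v ≠ [] := by intro h; rw [h] at hv; simp at hv
  set n := seq.length with hn
  have hbound : PySem.List.len v - 1 = (n : Int) := by
    rw [PySem.List.len_eq, hv]; push_cast; ring
  rw [hbound]
  have hassoc : ∀ (c : List String) (j : Int),
      c ++ PySem.List.pyRepeat ["nan"] (PySem.List.pyGetD v j 0)
        ++ PySem.List.pyGetD seq (PySem.List.pyGetD o j 0) []
      = c ++ (PySem.List.pyRepeat ["nan"] (PySem.List.pyGetD v j 0)
        ++ PySem.List.pyGetD seq (PySem.List.pyGetD o j 0) []) := by
    intro c j; rw [List.append_assoc]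
  rw [PySem.List.foldl_congr_mem _ _ _ _ (fun c j _ => hassoc c j),
      PySem.List.foldl_append_eq_flatMap, List.nil_append,
      List.flatMap_def,
      map_pyRange_zip (fun a b => PySem.List.pyRepeat ["nan"] a ++ PySem.List.pyGetD seq b [])
        v o 0 0 n (by omega) (by omega),
      List.take_of_length_le (l := o) (by omega),
      PySem.List.pyGetD_neg_one v _ hne]
  have hv' : v.take n ++ [v.getLast hne] = v := by
    have hdl : v.dropLast = v.take n := by rw [List.dropLast_eq_take, hv]; simp
    rw [← hdl]; exact List.dropLast_append_getLast hne
  conv_rhs => rw [← hv']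
  rw [List.zip_append (by simp; omega), List.flatMap_append, List.zip_map_right,
      List.flatMap_map]
  simp [List.flatMap_def]

lemma foldl_flatMap_foldl {α β γ : Type} (g : α → List β) (f : γ → β → γ) :
    ∀ (l : List α) (init : γ),
      (l.flatMap g).foldl f init = l.foldl (fun acc v => (g v).foldl f acc) init := by
  intro l
  induction l with
  | nil => intro init; simp
  | cons x xs ih => intro init; simp [List.foldl_append, ih]

lemma main_eq (os : List (List String)) (lp : Int) :
    create_variants os lp = create_variants_alt os lp := by
  simp only [create_variants, create_variants_alt]
  have hseq : os.foldl (fun acc s => if PySem.List.len s ≠ 0 then acc ++ [s] else acc) []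
      = os.filter (fun s => PySem.List.len s ≠ 0) := by
    simpa using PySem.List.foldl_append_if (fun s => decide (PySem.List.len s ≠ 0)) id os []
  rw [hseq]
  set s := os.filter (fun s => PySem.List.len s ≠ 0) with hs
  set free := lp - (s.map (fun s => PySem.List.len s)).sum with hfree
  rw [variants_eq_compsB free s.length]
  set V := compsB free (s.length + 1) with hV
  set orders := PySem.List.permutations (PySem.List.pyRange 0 (PySem.List.len s) 1) s.length with horders
  congr 1
  have hordlen : ∀ o ∈ orders, o.length = s.length := by
    intro o ho
    have hlen : (PySem.List.pyRange 0 (PySem.List.len s) 1).length = s.length := by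
      simp [PySem.List.length_pyRange_one, PySem.List.len_eq]
    rw [horders, ← hlen] at ho
    exact (PySem.List.perm_of_mem_permutations ho).length_eq.trans hlen
  simp only [PySem.List.foldl_append_singleton_eq_map]
  have houter : V.foldl (fun acc v => acc ++ orders.map (fun o =>
        (PySem.List.pyRange 0 (PySem.List.len v - 1) 1).foldl (fun c j =>
          c ++ PySem.List.pyRepeat ["nan"] (PySem.List.pyGetD v j 0)
            ++ PySem.List.pyGetD s (PySem.List.pyGetD o j 0) []) []
        ++ PySem.List.pyRepeat ["nan"] (PySem.List.pyGetD v (-1) 0))) []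
      = V.flatMap (fun v => orders.map (fun o =>
        (PySem.List.pyRange 0 (PySem.List.len v - 1) 1).foldl (fun c j =>
          c ++ PySem.List.pyRepeat ["nan"] (PySem.List.pyGetD v j 0)
            ++ PySem.List.pyGetD s (PySem.List.pyGetD o j 0) []) []
        ++ PySem.List.pyRepeat ["nan"] (PySem.List.pyGetD v (-1) 0))) := by
    simpa using PySem.List.foldl_append_eq_flatMap _ V []
  rw [houter, PySem.Set.ofList_eq_foldl, foldl_flatMap_foldl]
  show V.foldl _ ([] : PySem.Set (List String)) = V.foldl _ PySem.Set.empty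
  have hempty : (PySem.Set.empty : PySem.Set (List String)) = [] := rfl
  rw [hempty]
  apply PySem.List.foldl_congr_mem
  intro acc v hvmem
  have hvlen := length_of_mem_compsB _ _ _ (hV ▸ hvmem)
  rw [List.foldl_map]
  apply PySem.List.foldl_congr_mem
  intro acc2 o homem
  rw [concat_eq s v o hvlen (hordlen o homem)]

-- ===== VERDICT (by name: the statement is the Claim_ definition above) =====
theorem create_variants_spec : Claim_equal_create_variants := by
  intro original_seq len_place _
  unfold Spec_create_variants
  exact main_eq original_seq len_place
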